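-- pv_equiv track=rewrite | github.com/hkgkhanh/15-puzzle-solver | gen1234.py | encode_board
-- ===== SOURCE A (Python) =====
-- def encode_board(board):
--     encode_list = ["x", "x", "x", "x", "x"]
--     for i in range(len(board)):
--         for j in range(len(board[i])):
--             if board[i][j] == 1:
--                 encode_list[0] = "0123456789abcdef"[i * 4 + j]
--             elif board[i][j] == 2:
--                 encode_list[1] = "0123456789abcdef"[i * 4 + j]
--             elif board[i][j] == 3:
--                 encode_list[2] = "0123456789abcdef"[i * 4 + j]
--             elif board[i][j] == 4:
--                 encode_list[3] = "0123456789abcdef"[i * 4 + j]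
--             elif board[i][j] == 0:
--                 encode_list[4] = "0123456789abcdef"[i * 4 + j]
--
--     encode_str = "".join(encode_list)
--     return encode_str
-- ===== SOURCE B (Python) =====
-- def encode_board(board):
--     hexs = "0123456789abcdef"
--     out = []
--     for v in (1, 2, 3, 4, 0):
--         idxs = [i * 4 + j for i, row in enumerate(board) for j, c in enumerate(row) if c == v]
--         out.append(hexs[idxs[-1]] if idxs else "x")
--     return "".join(out)
-- ===== Notes on version B (the rewrite author's own statement) =====
-- stated objective: alternative
-- what changed: Output-driven search instead of A's input-driven write pass: for each tile in output order (1,2,3,4,0) B collects the flat positions of its occurrences and indexes the hex table at the last one, rather than maintaining a 5-slot list updated by a five-branch dispatch while scanning once.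
import Mathlib
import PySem

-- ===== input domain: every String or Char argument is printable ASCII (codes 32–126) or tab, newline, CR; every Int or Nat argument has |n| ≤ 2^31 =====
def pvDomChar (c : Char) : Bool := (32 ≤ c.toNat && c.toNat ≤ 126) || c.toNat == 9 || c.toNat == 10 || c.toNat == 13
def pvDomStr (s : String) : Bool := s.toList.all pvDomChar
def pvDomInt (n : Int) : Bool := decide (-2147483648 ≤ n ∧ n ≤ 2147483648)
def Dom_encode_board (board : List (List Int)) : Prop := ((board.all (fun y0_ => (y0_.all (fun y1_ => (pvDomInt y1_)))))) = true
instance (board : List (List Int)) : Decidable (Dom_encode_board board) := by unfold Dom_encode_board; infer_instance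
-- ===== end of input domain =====

-- B is output-driven: for each tile in output order (1,2,3,4,0) it collects the flat
-- positions of that value's occurrences and reads the hex table at the last one,
-- instead of A's single write pass into a 5-slot list via a five-branch dispatch.
-- Python one-character strings are Char; "".join of them is String.mk (exact).

-- "0123456789abcdef"[k]; total via getD — inputs where Python raises IndexError are outside Pre_.
def hexAt (k : Int) : Char := (PySem.Str.pyGet? "0123456789abcdef" k).getD 'x'

-- ===== PORT A =====
def pvStepA (i : Int) (el : List Char) (q : Int × Int) : List Char :=
  if q.2 = 1 then el.set 0 (hexAt (i * 4 + q.1))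
  else if q.2 = 2 then el.set 1 (hexAt (i * 4 + q.1))
  else if q.2 = 3 then el.set 2 (hexAt (i * 4 + q.1))
  else if q.2 = 4 then el.set 3 (hexAt (i * 4 + q.1))
  else if q.2 = 0 then el.set 4 (hexAt (i * 4 + q.1))
  else el

def encode_board (board : List (List Int)) : String :=
  let el := (PySem.List.enumerate board).foldl
    (fun el p => (PySem.List.enumerate p.2).foldl (pvStepA p.1) el)
    ['x', 'x', 'x', 'x', 'x']
  String.mk el

-- ===== PORT B =====
-- the comprehension [i*4+j for i,row in enumerate(board) for j,c in enumerate(row) if c == v]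
def pvIdxs (board : List (List Int)) (v : Int) : List Int :=
  (PySem.List.enumerate board).flatMap (fun p =>
    (PySem.List.enumerate p.2).filterMap (fun q =>
      if q.2 = v then some (p.1 * 4 + q.1) else none))

def encode_board_alt (board : List (List Int)) : String :=
  String.mk (([1, 2, 3, 4, 0] : List Int).map (fun v =>
    match (pvIdxs board v).getLast? with
    | some k => hexAt k
    | none => 'x'))

-- ===== PRECONDITION & SPEC =====
-- Pre_ excludes exactly the inputs on which Python A raises IndexError: a cell holding a
-- tracked value (0..4) at a flattened position i*4+j ≥ 16 (board larger than 4x4 there).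
def Pre_encode_board (board : List (List Int)) : Prop :=
  ∀ p ∈ PySem.List.enumerate board, ∀ q ∈ PySem.List.enumerate p.2,
    (q.2 = 0 ∨ q.2 = 1 ∨ q.2 = 2 ∨ q.2 = 3 ∨ q.2 = 4) → p.1 * 4 + q.1 < 16
instance (board : List (List Int)) : Decidable (Pre_encode_board board) := by
  unfold Pre_encode_board; infer_instance

def pvWitness_encode_board : List (List Int) :=
  [[1, 2, 3, 4], [5, 6, 7, 8], [9, 10, 11, 12], [13, 14, 15, 0]]

def Spec_encode_board (board : List (List Int)) (out : String) : Prop := out = encode_board_alt board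
instance (board : List (List Int)) (out : String) : Decidable (Spec_encode_board board out) := by unfold Spec_encode_board; infer_instance

-- ===== CLAIM (what is proved, stated in full; the proofs are below) =====
def Claim_equal_encode_board : Prop := ∀ (board : List (List Int)), Dom_encode_board board → Pre_encode_board board → Spec_encode_board board (encode_board board)

-- ===== LEMMAS AND PROOFS =====

-- A's step on a pre-flattened cell (flat index, value)
def pvStep' (el : List Char) (kc : Int × Int) : List Char :=
  if kc.2 = 1 then el.set 0 (hexAt kc.1)
  else if kc.2 = 2 then el.set 1 (hexAt kc.1)
  else if kc.2 = 3 then el.set 2 (hexAt kc.1)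
  else if kc.2 = 4 then el.set 3 (hexAt kc.1)
  else if kc.2 = 0 then el.set 4 (hexAt kc.1)
  else el

-- the board flattened to (flat index, value) cells, in A's scan order
def pvFlat (board : List (List Int)) : List (Int × Int) :=
  (PySem.List.enumerate board).flatMap (fun p =>
    (PySem.List.enumerate p.2).map (fun q => (p.1 * 4 + q.1, q.2)))

def pvSel (v : Int) (kc : Int × Int) : Option Int :=
  if kc.2 = v then some kc.1 else none

def pvLastW (cells : List (Int × Int)) (v : Int) (x : Char) : Char :=
  match (cells.filterMap (pvSel v)).getLast? with
  | some k => hexAt k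
  | none => x

theorem pvRow_flat (i : Int) (cells : List (Int × Int)) (el : List Char) :
    cells.foldl (pvStepA i) el
      = (cells.map (fun q => (i * 4 + q.1, q.2))).foldl pvStep' el := by
  rw [List.foldl_map]; rfl

theorem pvBoard_flat (rows : List (Int × List Int)) :
    ∀ el : List Char,
      rows.foldl (fun el p => (PySem.List.enumerate p.2).foldl (pvStepA p.1) el) el
        = (rows.flatMap (fun p =>
            (PySem.List.enumerate p.2).map (fun q => (p.1 * 4 + q.1, q.2)))).foldl pvStep' el := by
  induction rows with
  | nil => intro el; rfl
  | cons r rs ih =>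
      intro el
      rw [List.foldl_cons, List.flatMap_cons, List.foldl_append, ← pvRow_flat]
      exact ih _

theorem pvIdxs_flat (board : List (List Int)) (v : Int) :
    pvIdxs board v = (pvFlat board).filterMap (pvSel v) := by
  unfold pvIdxs pvFlat
  rw [List.filterMap_flatMap]
  simp only [List.filterMap_map]
  rfl

-- main characterisation of A's fold, by reverse induction (last write wins)
theorem pvFold_last (cells : List (Int × Int)) :
    ∀ a b c d e : Char,
      cells.foldl pvStep' [a, b, c, d, e]
        = [pvLastW cells 1 a, pvLastW cells 2 b, pvLastW cells 3 c,
           pvLastW cells 4 d, pvLastW cells 0 e] := by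
  induction cells using List.reverseRecOn with
  | nil => intro a b c d e; rfl
  | append_singleton cs q ih =>
      intro a b c d e
      obtain ⟨k, v⟩ := q
      rw [List.foldl_append, ih]
      simp only [List.foldl_cons, List.foldl_nil]
      by_cases h1 : v = 1
      · subst h1; simp [pvStep', pvLastW, pvSel, List.filterMap_append]
      by_cases h2 : v = 2
      · subst h2; simp [pvStep', pvLastW, pvSel, List.filterMap_append, h1]
      by_cases h3 : v = 3
      · subst h3; simp [pvStep', pvLastW, pvSel, List.filterMap_append, h1]
      by_cases h4 : v = 4
      · subst h4; simp [pvStep', pvLastW, pvSel, List.filterMap_append, h1]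
      by_cases h0 : v = 0
      · subst h0; simp [pvStep', pvLastW, pvSel, List.filterMap_append, h1, h2, h3, h4]
      · simp [pvStep', pvLastW, pvSel, List.filterMap_append, h0, h1, h2, h3, h4]

-- ===== VERDICT (by name: the statement is the Claim_ definition above) =====
theorem encode_board_spec : Claim_equal_encode_board := by
  intro board _ _
  unfold Spec_encode_board encode_board encode_board_alt
  rw [pvBoard_flat, pvFold_last]
  simp only [List.map_cons, List.map_nil, pvIdxs_flat]
  rfl
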